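-- pv_equiv track=rewrite | github.com/UtulsaEAP/lab-9-cts9883 | problem 4/intToBin.py | int_to_reverse_binary
-- ===== SOURCE A (Python) =====
-- def int_to_reverse_binary(num1):
--     if num1 == 0:
--         binary_val = [0]
--     else:
--         binary_val = []
--         while num1 >= 1:
--             binary_val.append(num1 % 2)
--             num1 = num1 // 2
--     return "".join(map(str, binary_val))
-- ===== SOURCE B (Python) =====
-- def int_to_reverse_binary(num1):
--     def rev(n):
--         if n < 1:
--             return ''
--         return str(n % 2) + rev(n // 2)
--     if num1 == 0:
--         return '0'
--     return rev(num1)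
-- ===== Notes on version B (the rewrite author's own statement) =====
-- stated objective: alternative
-- what changed: Replaces the while-loop that appends digits into a list and then joins with a direct recursion that builds the string front-to-back, with no intermediate list.
import Mathlib
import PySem

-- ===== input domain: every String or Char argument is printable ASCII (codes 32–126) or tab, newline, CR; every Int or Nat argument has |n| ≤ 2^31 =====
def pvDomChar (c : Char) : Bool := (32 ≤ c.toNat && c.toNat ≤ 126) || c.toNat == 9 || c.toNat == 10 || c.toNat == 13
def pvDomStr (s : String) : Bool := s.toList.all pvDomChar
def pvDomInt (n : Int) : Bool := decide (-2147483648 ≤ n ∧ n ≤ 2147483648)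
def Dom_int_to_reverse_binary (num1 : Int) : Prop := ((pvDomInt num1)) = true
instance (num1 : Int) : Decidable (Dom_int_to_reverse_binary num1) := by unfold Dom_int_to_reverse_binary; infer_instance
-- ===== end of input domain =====

-- B replaces A's while-loop (append digits to a list, then join) with a direct
-- recursion that builds the string front-to-back; alternative decomposition, same cost.


-- ===== PORT A =====
-- the while loop: append num1 % 2, halve, repeat while num1 >= 1
def pvALoop (n : Int) (acc : List Int) : List Int :=
  if n ≥ 1 then pvALoop (PySem.Int.floordiv n 2) (acc ++ [PySem.Int.mod n 2]) else acc
termination_by n.toNat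
decreasing_by
  simp only [PySem.Int.floordiv_eq_ediv_of_pos (by omega : (0:Int) < 2)]
  omega

def int_to_reverse_binary (num1 : Int) : String :=
  let binary_val := if num1 = 0 then [(0 : Int)] else pvALoop num1 []
  String.ofList (PySem.Chars.join [] (binary_val.map PySem.Int.toChars))

-- ===== PORT B =====
-- rev(n): '' if n < 1 else str(n % 2) + rev(n // 2)   (built on List Char, the string side)
def pvRev (n : Int) : List Char :=
  if n < 1 then [] else PySem.Int.toChars (PySem.Int.mod n 2) ++ pvRev (PySem.Int.floordiv n 2)
termination_by n.toNat
decreasing_by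
  simp only [PySem.Int.floordiv_eq_ediv_of_pos (by omega : (0:Int) < 2)]
  omega

def int_to_reverse_binary_alt (num1 : Int) : String :=
  if num1 = 0 then "0" else String.ofList (pvRev num1)

-- ===== PRECONDITION & SPEC =====
def Spec_int_to_reverse_binary (num1 : Int) (out : String) : Prop := out = int_to_reverse_binary_alt num1
instance (num1 : Int) (out : String) : Decidable (Spec_int_to_reverse_binary num1 out) := by unfold Spec_int_to_reverse_binary; infer_instance

-- ===== CLAIM (what is proved, stated in full; the proofs are below) =====
def Claim_equal_int_to_reverse_binary : Prop := ∀ (num1 : Int), Dom_int_to_reverse_binary num1 → Spec_int_to_reverse_binary num1 (int_to_reverse_binary num1)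

-- ===== LEMMAS AND PROOFS =====

-- join with empty separator is concatenation, one step
theorem pvJoin_nil_cons (p : List Char) (l : List (List Char)) :
    PySem.Chars.join [] (p :: l) = p ++ PySem.Chars.join [] l := by
  cases l with
  | nil => simp [PySem.Chars.join_singleton, PySem.Chars.join_nil]
  | cons q rest => simp [PySem.Chars.join_cons_cons]

-- the loop's accumulator is a prefix
theorem pvALoop_acc (n : Int) (acc : List Int) : pvALoop n acc = acc ++ pvALoop n [] := by
  induction n using pvRev.induct generalizing acc with
  | case1 n h =>
    rw [pvALoop, if_neg (by omega), pvALoop, if_neg (by omega)]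
    simp
  | case2 n h ih =>
    have h1 : n ≥ 1 := by omega
    conv_lhs => rw [pvALoop, if_pos h1, ih]
    conv_rhs => rw [pvALoop, if_pos h1, ih]
    simp

-- A's digit list, joined, is exactly B's recursion
theorem pvALoop_join (n : Int) :
    PySem.Chars.join [] ((pvALoop n []).map PySem.Int.toChars) = pvRev n := by
  induction n using pvRev.induct with
  | case1 n h =>
    rw [pvALoop, if_neg (by omega), pvRev, if_pos h]
    simp [PySem.Chars.join_nil]
  | case2 n h ih =>
    rw [pvALoop, if_pos (by omega), pvRev, if_neg h, pvALoop_acc]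
    simpa [pvJoin_nil_cons] using ih

-- ===== VERDICT (by name: the statement is the Claim_ definition above) =====
theorem int_to_reverse_binary_spec : Claim_equal_int_to_reverse_binary := by
  intro num1 _
  unfold Spec_int_to_reverse_binary int_to_reverse_binary int_to_reverse_binary_alt
  by_cases h : num1 = 0
  · simp [h]; decide
  · simp only [h, if_false]
    rw [pvALoop_join]
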